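-- pv_equiv track=rewrite | github.com/JordanK10/bernien_lab | AtomSortAlgorithms/Python/RectangularBC.py | Bank
-- ===== SOURCE A (Python) =====
-- def Toggle(a):
--     if a == True:
--         return False
--     if a == False:
--         return True
--
-- def Bank(Array,ColumnRange):
--     ## bank left
--     moves = []
--     H = len(Array)
--     pos = []
--     atoms = 0
--     for j in range(ColumnRange[0]):
--         for i in range(H):
--             if Array[i][j] == True:
--                 pos.append([i,j])
--
--     path = []
--     i = 0
--     j = 0
--     invert = True
--     while i < ColumnRange[0]:
--         while j < H and j>-1:
--             path.append([j,i])
--             if invert == True: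
--                 j += 1
--             else:
--                 j -= 1
--         i += 1
--         if invert == True:
--             j -= 1
--         else:
--             j += 1
--         invert = Toggle(invert)
--
--     i = 0
--     j = 0
--     while i < len(pos):
--         if Array[path[j][0]][path[j][1]] == True:
--            Array = Move(Array,path[j],path[i])
--            moves.append([path[j],path[i]])
--            i += 1
--         j += 1
--     return moves
--
-- def Move(Array,position1,position2):
--     NewArray = Array
--     NewArray[position1[0]][position1[1]] = False
--     NewArray[position2[0]][position2[1]] = True
--     return NewArray
-- ===== SOURCE B (Python) =====
-- def Bank(Array, ColumnRange):
--     ## bank left: collect sources by a snake-order scan; targets computed in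
--     ## closed form by divmod(k, H) -- no path list is ever built
--     W = ColumnRange[0]
--     H = len(Array)
--     sources = []
--     for c in range(W):
--         rows = range(H) if c % 2 == 0 else range(H - 1, -1, -1)
--         for r in rows:
--             if Array[r][c] == True:
--                 sources.append([r, c])
--     moves = []
--     for k, src in enumerate(sources):
--         q, rem = divmod(k, H)
--         tgt = [rem if q % 2 == 0 else H - 1 - rem, q]
--         Array[src[0]][src[1]] = False
--         Array[tgt[0]][tgt[1]] = True
--         moves.append([src, tgt])
--     return moves
-- ===== Notes on version B (the rewrite author's own statement) =====
-- stated objective: alternative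
-- what changed: B never builds A's snake path list (nor A's column-major census used only for its length): it collects occupied cells in one snake-order scan of the original grid and computes each move's target in closed form from its index via divmod(k, H), where A walks the materialized path with two interleaved pointers over the mutating grid.
import Mathlib
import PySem

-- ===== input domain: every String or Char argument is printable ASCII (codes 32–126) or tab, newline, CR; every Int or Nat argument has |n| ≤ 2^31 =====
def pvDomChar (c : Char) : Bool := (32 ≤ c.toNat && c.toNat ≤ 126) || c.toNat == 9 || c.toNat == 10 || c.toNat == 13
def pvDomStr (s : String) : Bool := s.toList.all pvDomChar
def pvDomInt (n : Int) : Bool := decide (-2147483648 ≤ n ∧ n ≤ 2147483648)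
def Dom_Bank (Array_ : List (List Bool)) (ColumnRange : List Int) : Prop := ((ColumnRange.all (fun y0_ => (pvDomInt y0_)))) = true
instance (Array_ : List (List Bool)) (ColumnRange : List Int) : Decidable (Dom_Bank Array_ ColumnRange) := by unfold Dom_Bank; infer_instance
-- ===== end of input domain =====

-- B never builds A's snake path list (nor the census A uses only for its length): it
-- gathers occupied cells in one snake-order scan and computes each target in closed form
-- by divmod(k, H); in Python both mutate Array in place identically — the theorems are
-- about the return value.

-- ===== PORT A =====

-- Python's Toggle (only ever called on bools)
def pvToggle (a : Bool) : Bool := if a = true then false else true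

-- Array[r][c] read; exact wherever Python returns (out-of-range reads raise, excluded by Pre_)
def pvGet2 (arr : List (List Bool)) (r c : Int) : Bool :=
  PySem.List.pyGetD (PySem.List.pyGetD arr r []) c false

def pvCellR (cell : List Int) : Int := PySem.List.pyGetD cell 0 0
def pvCellC (cell : List Int) : Int := PySem.List.pyGetD cell 1 0

-- Array[r][c] = v; exact for 0 ≤ r < len(Array), 0 ≤ c < len(row) — the only assignments reached under Pre_
def pvSet2 (arr : List (List Bool)) (r c : Int) (v : Bool) : List (List Bool) :=
  arr.set r.toNat ((PySem.List.pyGetD arr r []).set c.toNat v)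

-- Python's Move (sequential: clear position1, then set position2)
def pvMove (arr : List (List Bool)) (p1 p2 : List Int) : List (List Bool) :=
  pvSet2 (pvSet2 arr (pvCellR p1) (pvCellC p1) false) (pvCellR p2) (pvCellC p2) true

-- inner 'while j < H and j > -1' loop; the fuel only makes it total (H+1 steps always suffice)
def pvSnakeInner : Nat → Int → Int → Int → Bool → List (List Int) → List (List Int) × Int
  | 0, j, _, _, _, acc => (acc, j)
  | fuel+1, j, H, col, invert, acc =>
    if j < H ∧ -1 < j then
      pvSnakeInner fuel (if invert then j + 1 else j - 1) H col invert (acc ++ [[j, col]])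
    else (acc, j)

-- outer 'while i < ColumnRange[0]' loop; fuel = number of remaining iterations
def pvSnakeOuter : Nat → Int → Int → Int → Bool → List (List Int) → List (List Int)
  | 0, _, _, _, _, acc => acc
  | fuel+1, i, j, H, invert, acc =>
    let r := pvSnakeInner (H.toNat + 1) j H i invert acc
    pvSnakeOuter fuel (i+1) (if invert then r.2 - 1 else r.2 + 1) H (pvToggle invert) r.1

-- final 'while i < len(pos)' loop over the path suffix from pointer j; on [] with i < npos
-- Python raises IndexError — unreachable under Pre_
def pvPairLoop (path : List (List Int)) (npos : Int) :
    List (List Bool) → List (List Int) → Int → List (List (List Int)) → List (List (List Int))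
  | _, [], _, moves => moves
  | arr, cell :: rest, i, moves =>
    if i < npos then
      if pvGet2 arr (pvCellR cell) (pvCellC cell) then
        pvPairLoop path npos (pvMove arr cell (PySem.List.pyGetD path i []))
          rest (i+1) (moves ++ [[cell, PySem.List.pyGetD path i []]])
      else pvPairLoop path npos arr rest i moves
    else moves

def Bank (Array_ : List (List Bool)) (ColumnRange : List Int) : List (List (List Int)) :=
  let H : Int := Array_.length
  let pos : List (List Int) :=
    (PySem.List.pyRange 0 (PySem.List.pyGetD ColumnRange 0 0) 1).foldl
      (fun acc j => (PySem.List.pyRange 0 H 1).foldl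
        (fun acc2 i => if pvGet2 Array_ i j then acc2 ++ [[i, j]] else acc2) acc) []
  let path := pvSnakeOuter (PySem.List.pyGetD ColumnRange 0 0).toNat 0 0 H true []
  pvPairLoop path (pos.length : Int) Array_ path 0 []

-- ===== PORT B =====

-- Source B's closed-form target of move k: q, rem = divmod(k, H); [rem or H-1-rem, q].
-- divmod is PySem.Int.floordiv/mod; exact since the loop runs only when an atom exists,
-- so H > 0 wherever Python evaluates divmod (divmod(k, 0) would raise).
def pvTgt (H : Int) (k : Int) : List Int :=
  [if PySem.Int.mod (PySem.Int.floordiv k H) 2 = 0 then PySem.Int.mod k H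
   else H - 1 - PySem.Int.mod k H, PySem.Int.floordiv k H]

def Bank_alt (Array_ : List (List Bool)) (ColumnRange : List Int) : List (List (List Int)) :=
  let H : Int := Array_.length
  let sources : List (List Int) :=
    (PySem.List.pyRange 0 (PySem.List.pyGetD ColumnRange 0 0) 1).foldl
      (fun acc c =>
        (if PySem.Int.mod c 2 = 0 then PySem.List.pyRange 0 H 1
         else PySem.List.pyRange (H - 1) (-1) (-1)).foldl
          (fun acc2 r => if pvGet2 Array_ r c then acc2 ++ [[r, c]] else acc2) acc) []
  (PySem.List.enumerate sources 0).foldl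
    (fun mvs p => mvs ++ [[p.2, pvTgt H p.1]]) []

-- ===== PRECONDITION & SPEC =====
-- Pre_ excludes exactly the inputs on which the Python raises: an empty ColumnRange
-- (IndexError on ColumnRange[0]) and grids with a row shorter than ColumnRange[0]
-- (IndexError on Array[i][j]); A returns on every other input and Pre_ admits them all.
def Pre_Bank (Array_ : List (List Bool)) (ColumnRange : List Int) : Prop :=
  ColumnRange ≠ [] ∧ ∀ row ∈ Array_, ColumnRange.headD 0 ≤ (row.length : Int)
instance (Array_ : List (List Bool)) (ColumnRange : List Int) : Decidable (Pre_Bank Array_ ColumnRange) := by unfold Pre_Bank; infer_instance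

def pvWitness_Bank : List (List Bool) × List Int := ([[true, false], [false, true]], [2])

def Spec_Bank (Array_ : List (List Bool)) (ColumnRange : List Int) (out : List (List (List Int))) : Prop := out = Bank_alt Array_ ColumnRange
instance (Array_ : List (List Bool)) (ColumnRange : List Int) (out : List (List (List Int))) : Decidable (Spec_Bank Array_ ColumnRange out) := by unfold Spec_Bank; infer_instance

-- ===== CLAIM (what is proved, stated in full; the proofs are below) =====
def Claim_equal_Bank : Prop := ∀ (Array_ : List (List Bool)) (ColumnRange : List Int), Dom_Bank Array_ ColumnRange → Pre_Bank Array_ ColumnRange → Spec_Bank Array_ ColumnRange (Bank Array_ ColumnRange)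

-- ===== LEMMAS AND PROOFS =====

-- the canonical snake path, the common yardstick of both proofs
def pvCol (H c : Int) : List (List Int) :=
  (PySem.List.pyRange 0 H 1).map (fun r => [r, c])

def pvCanonCol (H : Int) (k : Nat) : List (List Int) :=
  if k % 2 = 0 then pvCol H (k : Int) else (pvCol H (k : Int)).reverse

def pvCanonPath (W H : Int) : List (List Int) :=
  (List.range W.toNat).flatMap (pvCanonCol H)

lemma cellR_pair (r c : Int) : pvCellR [r, c] = r := by simp [pvCellR, PySem.List.pyGetD]
lemma cellC_pair (r c : Int) : pvCellC [r, c] = c := by simp [pvCellC, PySem.List.pyGetD]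

lemma snakeInner_up (H col : Int) : ∀ (fuel : Nat) (j : Int) (acc : List (List Int)),
    0 ≤ j → (H - j).toNat < fuel →
    pvSnakeInner fuel j H col true acc
      = (acc ++ (PySem.List.pyRange j H 1).map (fun r => [r, col]), if j < H then H else j) := by
  intro fuel
  induction fuel with
  | zero => intro j acc h1 h2; omega
  | succ fuel ih =>
    intro j acc h1 h2
    by_cases hjH : j < H
    · rw [pvSnakeInner, if_pos ⟨hjH, by omega⟩, if_pos rfl]
      rw [ih (j+1) _ (by omega) (by omega)]
      rw [PySem.List.pyRange_one_cons hjH]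
      simp only [List.map_cons, List.append_assoc, List.singleton_append]
      refine Prod.ext rfl ?_
      simp only
      rw [if_pos hjH]
      split <;> omega
    · rw [pvSnakeInner, if_neg (by omega)]
      rw [PySem.List.pyRange_one_eq_nil (by omega)]
      simp [hjH]

lemma snakeInner_down (H col : Int) : ∀ (fuel : Nat) (j : Int) (acc : List (List Int)),
    j < H → (j + 1).toNat < fuel →
    pvSnakeInner fuel j H col false acc
      = (acc ++ (PySem.List.pyRange j (-1) (-1)).map (fun r => [r, col]), if -1 < j then -1 else j) := by
  intro fuel
  induction fuel with
  | zero => intro j acc h1 h2; omega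
  | succ fuel ih =>
    intro j acc h1 h2
    by_cases hj : -1 < j
    · rw [pvSnakeInner, if_pos ⟨h1, hj⟩, if_neg (by simp)]
      rw [ih (j-1) _ (by omega) (by omega)]
      rw [PySem.List.pyRange_neg_one_cons (by omega : (-1:Int) < j)]
      simp only [List.map_cons, List.append_assoc, List.singleton_append]
      refine Prod.ext rfl ?_
      simp only
      rw [if_pos hj]
      split <;> omega
    · rw [pvSnakeInner, if_neg (by omega)]
      rw [PySem.List.pyRange_neg_one_eq_nil (by omega)]
      simp [hj]

lemma parity_flip (k : Nat) : (decide ((k+1) % 2 = 0)) = !(decide (k % 2 = 0)) := by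
  rcases Nat.mod_two_eq_zero_or_one k with h | h <;> simp [Nat.add_mod, h]

lemma snakeOuter_eq (H : Int) (hH : 0 ≤ H) : ∀ (n : Nat) (i : Int) (invert : Bool) (acc : List (List Int)),
    pvSnakeOuter n i (if invert then 0 else H - 1) H invert acc
      = acc ++ (List.range n).flatMap
          (fun (k : Nat) => if (invert = decide (k % 2 = 0)) then pvCol H (i + (k : Int)) else (pvCol H (i + (k : Int))).reverse) := by
  intro n
  induction n with
  | zero => intro i invert acc; simp [pvSnakeOuter]
  | succ n ih =>
    intro i invert acc
    have hrw : List.flatMap (fun (k : Nat) => if (invert = decide (k % 2 = 0)) then pvCol H (i + (k : Int)) else (pvCol H (i + (k : Int))).reverse) (List.range (n+1))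
        = (if invert then pvCol H i else (pvCol H i).reverse)
          ++ List.flatMap (fun (k : Nat) => if ((!invert) = decide (k % 2 = 0)) then pvCol H ((i+1) + (k : Int)) else (pvCol H ((i+1) + (k : Int))).reverse) (List.range n) := by
      rw [List.range_succ_eq_map, List.flatMap_cons, List.flatMap_map]
      congr 1
      · cases invert <;> simp
      · apply List.flatMap_congr
        intro k _
        simp only [Nat.succ_eq_add_one, parity_flip]
        have hcast : i + ((k+1 : Nat) : Int) = (i + 1) + (k : Int) := by push_cast; ring
        rw [hcast]
        cases invert <;> cases h : decide (k % 2 = 0) <;> simp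
    rw [hrw]
    cases invert with
    | true =>
      rw [pvSnakeOuter]
      simp only [if_true]
      rw [snakeInner_up H i (H.toNat + 1) 0 acc le_rfl (by omega)]
      simp only
      have hj : (if (0:Int) < H then H else 0) - 1 = (if (false : Bool) then 0 else H - 1) := by
        simp only [Bool.false_eq_true, if_false]; split <;> omega
      rw [hj]
      have : pvToggle true = false := rfl
      rw [this, ih (i+1) false]
      simp [pvCol, List.append_assoc]
    | false =>
      rw [pvSnakeOuter]
      simp only [Bool.false_eq_true, if_false]
      rw [snakeInner_down H i (H.toNat + 1) (H-1) acc (by omega) (by omega)]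
      simp only
      have hj : (if (-1:Int) < H - 1 then -1 else H - 1) + 1 = (if (true : Bool) then 0 else H - 1) := by
        simp only [if_true]; split <;> omega
      rw [hj]
      have : pvToggle false = true := rfl
      rw [this, ih (i+1) true]
      have hrev : (PySem.List.pyRange (H-1) (-1) (-1)).map (fun r => [r, i]) = (pvCol H i).reverse := by
        have := PySem.List.pyRange_neg_one_eq_reverse (H-1) (-1)
        simp only [neg_add_cancel] at this
        rw [pvCol, this, List.map_reverse]
        norm_num
      rw [hrev]
      simp [List.append_assoc]

-- A's path equals the canonical snake path
lemma pathA_eq (W H : Int) (hH : 0 ≤ H) :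
    pvSnakeOuter W.toNat 0 0 H true [] = pvCanonPath W H := by
  have h := snakeOuter_eq H hH W.toNat 0 true []
  simp only [if_true] at h
  rw [h, pvCanonPath]
  simp only [List.nil_append]
  apply List.flatMap_congr
  intro k _
  simp only [pvCanonCol, zero_add]
  cases h : decide (k % 2 = 0) <;> simp_all

-- A's census list pos has the same length as the filtered canonical path
lemma pos_length_eq (arr : List (List Bool)) (W H : Int) :
    ((PySem.List.pyRange 0 W 1).foldl
      (fun acc j => (PySem.List.pyRange 0 H 1).foldl
        (fun acc2 i => if pvGet2 arr i j then acc2 ++ [[i, j]] else acc2) acc) []).length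
    = ((pvCanonPath W H).filter (fun cell => pvGet2 arr (pvCellR cell) (pvCellC cell))).length := by
  have hin : ∀ (acc : List (List Int)) (j : Int),
      (PySem.List.pyRange 0 H 1).foldl
        (fun acc2 i => if pvGet2 arr i j then acc2 ++ [[i, j]] else acc2) acc
      = acc ++ ((PySem.List.pyRange 0 H 1).filter (fun i => pvGet2 arr i j)).map (fun i => [i, j]) :=
    fun acc j => PySem.List.foldl_append_if (fun i => pvGet2 arr i j) (fun i => [i, j]) _ acc
  rw [PySem.List.foldl_congr_mem _ _
      (fun acc j => acc ++ ((PySem.List.pyRange 0 H 1).filter (fun i => pvGet2 arr i j)).map (fun i => [i, j])) _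
      (fun acc j _ => hin acc j)]
  rw [PySem.List.foldl_append_eq_flatMap, List.nil_append]
  rw [pvCanonPath, List.filter_flatMap]
  rw [PySem.List.pyRange_one 0 W, List.flatMap_map]
  simp only [List.length_flatMap, Int.sub_zero, zero_add]
  congr 1
  apply List.map_congr_left
  intro k _
  have hcol : ∀ (c : Int), (List.filter (fun cell => pvGet2 arr (pvCellR cell) (pvCellC cell)) (pvCol H c)).length
      = (List.filter (fun i => pvGet2 arr i c) (PySem.List.pyRange 0 H 1)).length := by
    intro c
    have hf : ((fun cell => pvGet2 arr (pvCellR cell) (pvCellC cell)) ∘ (fun (r : Int) => [r, c])) = (fun i => pvGet2 arr i c) := by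
      funext r; simp [Function.comp, cellR_pair, cellC_pair]
    rw [pvCol, List.filter_map, hf, List.length_map]
  rw [pvCanonCol]
  rcases Nat.mod_two_eq_zero_or_one k with h | h <;> simp only [h] <;> simp [hcol, List.filter_reverse]

lemma mem_canonCol (H : Int) (k : Nat) (x : List Int) :
    x ∈ pvCanonCol H k ↔ ∃ r : Int, 0 ≤ r ∧ r < H ∧ x = [r, (k : Int)] := by
  rw [pvCanonCol]
  have : x ∈ pvCol H (k : Int) ↔ ∃ r : Int, 0 ≤ r ∧ r < H ∧ x = [r, (k : Int)] := by
    rw [pvCol]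
    simp only [List.mem_map, PySem.List.mem_pyRange_one]
    constructor
    · rintro ⟨r, ⟨h1, h2⟩, rfl⟩; exact ⟨r, h1, h2, rfl⟩
    · rintro ⟨r, h1, h2, rfl⟩; exact ⟨r, ⟨h1, h2⟩, rfl⟩
  split
  · exact this
  · rw [List.mem_reverse]; exact this

lemma canonCol_nodup (H : Int) (k : Nat) : (pvCanonCol H k).Nodup := by
  rw [pvCanonCol]
  have : (pvCol H (k : Int)).Nodup := by
    rw [pvCol]
    apply List.Nodup.map
    · intro a b hab
      simpa using congrArg (fun l => l.getD 0 0) hab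
    · exact PySem.List.nodup_pyRange_one 0 H
  split
  · exact this
  · exact List.nodup_reverse.mpr this

lemma canonPath_nodup (W H : Int) : (pvCanonPath W H).Nodup := by
  rw [pvCanonPath, List.nodup_flatMap]
  refine ⟨fun k _ => canonCol_nodup H k, ?_⟩
  have := List.pairwise_lt_range (n := W.toNat)
  apply this.imp
  intro a b hab
  rw [Function.onFun, List.disjoint_left]
  intro x hxa hxb
  rw [mem_canonCol] at hxa hxb
  obtain ⟨r, _, _, rfl⟩ := hxa
  obtain ⟨r', _, _, hx⟩ := hxb
  have : (a : Int) = (b : Int) := by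
    have := congrArg (fun l => l.getD 1 0) hx
    simpa using this
  omega

lemma canonPath_good (W H : Int) :
    ∀ cell ∈ pvCanonPath W H, ∃ r c : Int, cell = [r, c] ∧ 0 ≤ r ∧ 0 ≤ c := by
  intro cell hc
  rw [pvCanonPath, List.mem_flatMap] at hc
  obtain ⟨k, _, hk⟩ := hc
  rw [mem_canonCol] at hk
  obtain ⟨r, h1, _, rfl⟩ := hk
  exact ⟨r, (k : Int), rfl, h1, by positivity⟩

-- a read at (r,c) is unchanged by a write at a different nonnegative position
lemma get2_set2 (arr : List (List Bool)) (r c a b : Int) (v : Bool)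
    (hr : 0 ≤ r) (hc : 0 ≤ c) (ha : 0 ≤ a) (hb : 0 ≤ b) (hne : r ≠ a ∨ c ≠ b) :
    pvGet2 (pvSet2 arr a b v) r c = pvGet2 arr r c := by
  rw [pvGet2, pvGet2, pvSet2]
  rw [PySem.List.pyGetD_of_nonneg _ _ hr, PySem.List.pyGetD_of_nonneg _ _ hr]
  by_cases hra : r = a
  · subst hra
    have hcb : c ≠ b := by tauto
    rw [PySem.List.pyGetD_of_nonneg _ _ hr]
    by_cases hlt : r.toNat < arr.length
    · rw [List.getD_eq_getElem?_getD, List.getElem?_set, if_pos rfl, if_pos hlt]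
      rw [List.getD_eq_getElem?_getD, List.getElem?_eq_getElem hlt]
      simp only [Option.getD_some]
      rw [PySem.List.pyGetD_of_nonneg _ _ hc, PySem.List.pyGetD_of_nonneg _ _ hc]
      rw [List.getD_eq_getElem?_getD, List.getElem?_set,
          if_neg (by omega), ← List.getD_eq_getElem?_getD]
    · rw [List.set_eq_of_length_le (by omega)]
  · rw [List.getD_eq_getElem?_getD, List.getElem?_set, if_neg (by omega),
        ← List.getD_eq_getElem?_getD]

lemma getElem_not_mem_drop {α : Type} (l : List α) (i j : Nat) (h : i ≤ j) (hi : i < l.length)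
    (hnd : l.Nodup) : l[i] ∉ l.drop (j+1) := by
  intro hmem
  rw [List.mem_iff_getElem] at hmem
  obtain ⟨k, hk, he⟩ := hmem
  rw [List.getElem_drop] at he
  have := (List.Nodup.getElem_inj_iff hnd).mp he.symm
  omega

lemma good_ne_coords {x y : List Int} (r c r' c' : Int) (hx : x = [r, c]) (hy : y = [r', c'])
    (hne : x ≠ y) : r ≠ r' ∨ c ≠ c' := by
  by_cases h1 : r = r'
  · right; intro h2; exact hne (by rw [hx, hy, h1, h2])
  · left; exact h1

lemma get2_move (arr : List (List Bool)) (x p1 p2 : List Int)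
    (r c r1 c1 r2 c2 : Int)
    (hx : x = [r, c]) (hp1 : p1 = [r1, c1]) (hp2 : p2 = [r2, c2])
    (h0 : 0 ≤ r) (h0' : 0 ≤ c) (h1 : 0 ≤ r1) (h1' : 0 ≤ c1) (h2 : 0 ≤ r2) (h2' : 0 ≤ c2)
    (hne1 : x ≠ p1) (hne2 : x ≠ p2) :
    pvGet2 (pvMove arr p1 p2) (pvCellR x) (pvCellC x) = pvGet2 arr (pvCellR x) (pvCellC x) := by
  subst hx hp1 hp2
  rw [pvMove]
  simp only [cellR_pair, cellC_pair]
  rw [get2_set2 _ _ _ _ _ _ h0 h0' h2 h2' (good_ne_coords r c r2 c2 rfl rfl hne2)]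
  rw [get2_set2 _ _ _ _ _ _ h0 h0' h1 h1' (good_ne_coords r c r1 c1 rfl rfl hne1)]

-- the invariant of A's pairing loop: scanning a suffix of the mutated grid produces the
-- filter/zip of the original grid
lemma pairLoop_inv (arr0 : List (List Bool)) (path : List (List Int)) (npos : Nat)
    (hnd : path.Nodup)
    (hgood : ∀ cell ∈ path, ∃ r c : Int, cell = [r, c] ∧ 0 ≤ r ∧ 0 ≤ c) :
    ∀ (suffix : List (List Int)) (j i : Nat) (arr : List (List Bool)) (moves : List (List (List Int))),
    suffix = path.drop j → i ≤ j →
    i + suffix.countP (fun cell => pvGet2 arr0 (pvCellR cell) (pvCellC cell)) = npos →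
    (∀ cell ∈ suffix, pvGet2 arr (pvCellR cell) (pvCellC cell)
        = pvGet2 arr0 (pvCellR cell) (pvCellC cell)) →
    pvPairLoop path (npos : Int) arr suffix (i : Int) moves
      = moves ++ List.zipWith (fun s t => [s, t])
          (suffix.filter (fun cell => pvGet2 arr0 (pvCellR cell) (pvCellC cell)))
          (path.drop i) := by
  intro suffix
  induction suffix generalizing arr0 with
  | nil => intro j i arr moves _ _ _ _; simp [pvPairLoop]
  | cons cell rest ih =>
    intro j i arr moves hdrop hij hcount hagree
    have hjlen : j < path.length := by
      by_contra h
      rw [List.drop_eq_nil_of_le (by omega)] at hdrop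
      exact List.cons_ne_nil _ _ hdrop
    have hpathj : path[j] = cell ∧ rest = path.drop (j+1) := by
      rw [List.drop_eq_getElem_cons hjlen] at hdrop
      exact ⟨(List.cons.injEq _ _ _ _ ▸ hdrop).1.symm, (List.cons.injEq _ _ _ _ ▸ hdrop).2⟩
    have hilen : i < path.length := by omega
    have htgt : PySem.List.pyGetD path (i : Int) [] = path[i] := by
      rw [PySem.List.pyGetD_natCast, List.getD_eq_getElem?_getD, List.getElem?_eq_getElem hilen,
        Option.getD_some]
    have hcellmem : cell ∈ path := by
      have : cell ∈ path.drop j := by rw [← hdrop]; exact List.mem_cons_self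
      exact List.mem_of_mem_drop this
    by_cases hi : i < npos
    · rw [pvPairLoop, if_pos (by exact_mod_cast hi)]
      have hagcell := hagree cell (List.mem_cons_self)
      by_cases hp : pvGet2 arr0 (pvCellR cell) (pvCellC cell)
      · rw [if_pos (by rw [hagcell]; exact hp)]
        rw [htgt]
        have hdrop' : rest = path.drop (j+1) := hpathj.2
        have hcount' : (i+1) + rest.countP (fun cell => pvGet2 arr0 (pvCellR cell) (pvCellC cell)) = npos := by
          rw [List.countP_cons, if_pos (by simpa using hp)] at hcount
          omega
        have hagree' : ∀ x ∈ rest, pvGet2 (pvMove arr cell path[i]) (pvCellR x) (pvCellC x)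
            = pvGet2 arr0 (pvCellR x) (pvCellC x) := by
          intro x hx
          obtain ⟨r, c, hxe, hr, hc⟩ := hgood x (by rw [hdrop'] at hx; exact List.mem_of_mem_drop hx)
          obtain ⟨r1, c1, hce, hr1, hc1⟩ := hgood cell hcellmem
          obtain ⟨r2, c2, hte, hr2, hc2⟩ := hgood path[i] (List.getElem_mem hilen)
          have hxne1 : x ≠ cell := by
            intro he
            rw [hdrop'] at hx
            refine getElem_not_mem_drop path j j le_rfl hjlen hnd ?_
            rw [hpathj.1]
            exact he ▸ hx
          have hxne2 : x ≠ path[i] := by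
            intro he
            rw [hdrop'] at hx
            exact getElem_not_mem_drop path i j hij hilen hnd (he ▸ hx)
          rw [get2_move arr x cell path[i] r c r1 c1 r2 c2 hxe hce hte hr hc hr1 hc1 hr2 hc2 hxne1 hxne2]
          exact hagree x (List.mem_cons_of_mem _ hx)
        have hrec := ih arr0 (j+1) (i+1) (pvMove arr cell path[i])
          (moves ++ [[cell, path[i]]]) hdrop' (by omega) hcount' hagree'
        rw [show ((i : Int) + 1) = ((i+1 : Nat) : Int) by push_cast; ring] at *
        rw [hrec]
        rw [List.filter_cons_of_pos (by simpa using hp)]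
        rw [List.drop_eq_getElem_cons hilen, List.zipWith_cons_cons]
        simp [List.append_assoc]
      · rw [if_neg (by rw [hagcell]; simpa using hp)]
        have hrec := ih arr0 (j+1) i arr moves hpathj.2 (by omega)
          (by rw [List.countP_cons, if_neg (by simpa using hp)] at hcount; omega)
          (fun x hx => hagree x (List.mem_cons_of_mem _ hx))
        rw [hrec, List.filter_cons_of_neg (by simpa using hp)]
    · rw [pvPairLoop, if_neg (by exact_mod_cast hi)]
      have : rest.countP (fun cell => pvGet2 arr0 (pvCellR cell) (pvCellC cell)) = 0 ∧
          ¬ pvGet2 arr0 (pvCellR cell) (pvCellC cell) := by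
        rw [List.countP_cons] at hcount
        constructor
        · omega
        · intro h
          rw [if_pos (by simpa using h)] at hcount
          omega
      rw [List.filter_cons_of_neg (by simpa using this.2)]
      rw [List.filter_eq_nil_iff.mpr (fun x hx => by
        have := List.countP_eq_zero.mp this.1 x hx
        simpa using this)]
      simp

-- B's snake-order scan collects exactly the occupied cells of the canonical path, in order
lemma sourcesB_eq (arr : List (List Bool)) (W H : Int) :
    (PySem.List.pyRange 0 W 1).foldl
      (fun acc c =>
        (if PySem.Int.mod c 2 = 0 then PySem.List.pyRange 0 H 1
         else PySem.List.pyRange (H - 1) (-1) (-1)).foldl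
          (fun acc2 r => if pvGet2 arr r c then acc2 ++ [[r, c]] else acc2) acc) []
    = (pvCanonPath W H).filter (fun cell => pvGet2 arr (pvCellR cell) (pvCellC cell)) := by
  have hin : ∀ (acc : List (List Int)) (c : Int),
      (if PySem.Int.mod c 2 = 0 then PySem.List.pyRange 0 H 1
       else PySem.List.pyRange (H - 1) (-1) (-1)).foldl
          (fun acc2 r => if pvGet2 arr r c then acc2 ++ [[r, c]] else acc2) acc
      = acc ++ ((if PySem.Int.mod c 2 = 0 then PySem.List.pyRange 0 H 1
                 else PySem.List.pyRange (H - 1) (-1) (-1)).filter (fun r => pvGet2 arr r c)).map (fun r => [r, c]) :=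
    fun acc c => PySem.List.foldl_append_if (fun r => pvGet2 arr r c) (fun r => [r, c]) _ acc
  rw [PySem.List.foldl_congr_mem _ _
      (fun acc c => acc ++ ((if PySem.Int.mod c 2 = 0 then PySem.List.pyRange 0 H 1
                 else PySem.List.pyRange (H - 1) (-1) (-1)).filter (fun r => pvGet2 arr r c)).map (fun r => [r, c])) _
      (fun acc c _ => hin acc c)]
  rw [PySem.List.foldl_append_eq_flatMap, List.nil_append]
  rw [pvCanonPath, List.filter_flatMap]
  rw [PySem.List.pyRange_one 0 W, List.flatMap_map]
  simp only [Int.sub_zero, zero_add]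
  apply List.flatMap_congr
  intro k _
  have hf : ((fun cell => pvGet2 arr (pvCellR cell) (pvCellC cell)) ∘ (fun (r : Int) => [r, ((k:Nat) : Int)])) = (fun r => pvGet2 arr r ((k:Nat) : Int)) := by
    funext r; simp [Function.comp, cellR_pair, cellC_pair]
  have hmod : PySem.Int.mod ((k : Nat) : Int) 2 = ((k % 2 : Nat) : Int) := by
    exact_mod_cast PySem.Int.mod_natCast k 2
  have hrev : PySem.List.pyRange (H - 1) (-1) (-1) = (PySem.List.pyRange 0 H 1).reverse := by
    have := PySem.List.pyRange_neg_one_eq_reverse (H-1) (-1)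
    simpa using this
  rw [hmod, pvCanonCol]
  rcases Nat.mod_two_eq_zero_or_one k with h | h
  · rw [h]
    rw [if_pos (by norm_num), if_pos rfl, pvCol, List.filter_map, hf]
  · rw [h]
    rw [if_neg (by norm_num), if_neg (by omega), hrev]
    simp only [List.filter_reverse, List.map_reverse]
    rw [pvCol, List.filter_map, hf]

lemma canonCol_length (H : Int) (k : Nat) : (pvCanonCol H k).length = H.toNat := by
  rw [pvCanonCol]
  have : (pvCol H (k:Int)).length = H.toNat := by
    rw [pvCol, List.length_map, PySem.List.length_pyRange_one]; omega
  split <;> simp [this]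

lemma canonPath_length (W H : Int) : (pvCanonPath W H).length = W.toNat * H.toNat := by
  rw [pvCanonPath, List.length_flatMap]
  rw [List.map_congr_left (fun k _ => canonCol_length H k)]
  simp [List.sum_replicate, List.map_const']

lemma flatMap_canonCol_length (H : Int) (n : Nat) :
    ((List.range n).flatMap (pvCanonCol H)).length = n * H.toNat := by
  rw [List.length_flatMap, List.map_congr_left (fun k _ => canonCol_length H k)]
  simp [List.sum_replicate, List.map_const']

-- the closed-form target of Source B is the k-th cell of the canonical path
lemma tgt_eq_getElem_gen (m : Nat) : ∀ (n k : Nat) (hk : k < n * m),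
    pvTgt ((m : Nat) : Int) (k : Int)
      = ((List.range n).flatMap (pvCanonCol ((m : Nat) : Int)))[k]'(by
          rw [flatMap_canonCol_length]; simpa using hk) := by
  intro n
  induction n with
  | zero => intro k h; omega
  | succ n ih =>
    intro k hkn
    rw [show (n+1) * m = n * m + m from by ring] at hkn
    have hm : (0:Nat) < m := by
      rcases Nat.eq_zero_or_pos m with h0 | h0
      · rw [h0] at hkn; omega
      · exact h0
    have hlen : ((List.range n).flatMap (pvCanonCol ((m:Nat):Int))).length = n * m := by
      rw [flatMap_canonCol_length]; simp
    have hstep : ((List.range (n+1)).flatMap (pvCanonCol ((m:Nat):Int)))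
        = ((List.range n).flatMap (pvCanonCol ((m:Nat):Int))) ++ pvCanonCol ((m:Nat):Int) n := by
      rw [List.range_succ, List.flatMap_append, List.flatMap_singleton]
    rw [List.getElem_of_eq hstep]
    by_cases hsm : k < n * m
    · rw [List.getElem_append_left (by rw [hlen]; exact hsm)]
      exact ih k hsm
    · have hoff : k - n * m < m := by omega
      rw [List.getElem_append_right (by rw [hlen]; omega)]
      have hdiv : k / m = n := Nat.div_eq_of_lt_le (by omega) (by omega)
      have hmod : k % m = k - n * m := by
        have h1 : k % m = (k - n * m) % m := by
          conv_lhs => rw [show k = (k - n * m) + n * m from by omega]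
          rw [Nat.add_mul_mod_self_right]
        rw [h1, Nat.mod_eq_of_lt hoff]
      have hq : PySem.Int.floordiv ((k:Nat):Int) ((m:Nat):Int) = ((n:Nat):Int) := by
        rw [PySem.Int.floordiv_natCast, hdiv]
      have hr : PySem.Int.mod ((k:Nat):Int) ((m:Nat):Int) = ((k - n * m : Nat) : Int) := by
        rw [PySem.Int.mod_natCast, hmod]
      have hq2 : PySem.Int.mod ((n:Nat):Int) 2 = ((n % 2 : Nat) : Int) := by
        exact_mod_cast PySem.Int.mod_natCast n 2
      rw [pvTgt, hq, hr, hq2]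
      simp only [hlen, pvCanonCol]
      rcases Nat.mod_two_eq_zero_or_one n with h | h
      · simp only [h, Nat.cast_zero, reduceIte, pvCol, List.getElem_map,
          PySem.List.getElem_pyRange_one]
        simp
      · have hc1 : ¬ (((n % 2 : Nat) : Int) = 0) := by rw [h]; norm_num
        have hc2 : ¬ (n % 2 = 0) := by omega
        simp only [if_neg hc1, if_neg hc2, List.getElem_reverse, pvCol, List.getElem_map,
          List.length_map, PySem.List.length_pyRange_one, PySem.List.getElem_pyRange_one]
        congr 1
        omega

lemma tgt_eq_getElem (W H : Int) (hH : 0 ≤ H) (k : Nat) (hk : k < (pvCanonPath W H).length) :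
    pvTgt H (k : Int) = (pvCanonPath W H)[k] := by
  obtain ⟨m, rfl⟩ : ∃ m : Nat, H = ((m : Nat) : Int) := ⟨H.toNat, by omega⟩
  have hk2 : k < W.toNat * m := by
    rw [canonPath_length] at hk
    simpa using hk
  simp only [pvCanonPath]
  exact tgt_eq_getElem_gen m W.toNat k hk2

-- B's enumerate loop pairs the sources with the canonical path, by the closed form
lemma enumTgtLoop_eq (H : Int) (P : List (List Int)) :
    ∀ (src : List (List Int)) (s : Nat) (mvs : List (List (List Int))),
    s + src.length ≤ P.length →
    (∀ (k : Nat) (hk : k < P.length), s ≤ k → pvTgt H (k : Int) = P[k]) →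
    (PySem.List.enumerate src (s : Int)).foldl
      (fun mvs p => mvs ++ [[p.2, pvTgt H p.1]]) mvs
      = mvs ++ List.zipWith (fun a t => [a, t]) src (P.drop s) := by
  intro src
  induction src with
  | nil => intro s mvs _ _; simp [PySem.List.enumerate_nil]
  | cons x xs ih =>
    intro s mvs hlen htgt
    have hs : s < P.length := by simp at hlen; omega
    rw [PySem.List.enumerate_cons, List.foldl_cons]
    simp only
    rw [htgt s hs le_rfl]
    rw [show ((s : Int) + 1) = ((s+1 : Nat) : Int) by push_cast; ring]
    rw [ih (s+1) _ (by simp at hlen ⊢; omega) (fun k hk hsk => htgt k hk (by omega))]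
    rw [List.drop_eq_getElem_cons hs, List.zipWith_cons_cons]
    simp [List.append_assoc]

theorem bank_eq (Array_ : List (List Bool)) (ColumnRange : List Int) :
    Bank Array_ ColumnRange = Bank_alt Array_ ColumnRange := by
  have hH : (0:Int) ≤ (Array_.length : Int) := by positivity
  simp only [Bank, Bank_alt]
  rw [pathA_eq _ _ hH, pos_length_eq, sourcesB_eq]
  have hA := pairLoop_inv Array_ (pvCanonPath (PySem.List.pyGetD ColumnRange 0 0) (Array_.length : Int))
    (((pvCanonPath (PySem.List.pyGetD ColumnRange 0 0) (Array_.length : Int)).filter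
        (fun cell => pvGet2 Array_ (pvCellR cell) (pvCellC cell))).length)
    (canonPath_nodup _ _) (canonPath_good _ _)
    (pvCanonPath (PySem.List.pyGetD ColumnRange 0 0) (Array_.length : Int)) 0 0 Array_ []
    (by simp) le_rfl (by simp [List.countP_eq_length_filter]) (fun _ _ => rfl)
  have hB := enumTgtLoop_eq (Array_.length : Int)
    (pvCanonPath (PySem.List.pyGetD ColumnRange 0 0) (Array_.length : Int))
    ((pvCanonPath (PySem.List.pyGetD ColumnRange 0 0) (Array_.length : Int)).filter
        (fun cell => pvGet2 Array_ (pvCellR cell) (pvCellC cell))) 0 []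
    (by simpa using List.length_filter_le _ _)
    (fun k hk _ => tgt_eq_getElem _ _ hH k hk)
  simp only [Nat.cast_zero, List.drop_zero, List.nil_append] at hA hB
  rw [hA, hB]

-- ===== VERDICT (by name: the statement is the Claim_ definition above) =====
theorem Bank_spec : Claim_equal_Bank := by
  intro Array_ ColumnRange _ _
  unfold Spec_Bank
  exact bank_eq Array_ ColumnRange
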